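-- pv_equiv track=rewrite | github.com/aosp-mirror/platform_build | tools/releasetools/common.py | SharedUidPartitionViolations
-- ===== SOURCE A (Python) =====
-- def SharedUidPartitionViolations(uid_dict, partition_groups):
--   """Checks for APK sharedUserIds that cross partition group boundaries.
--
--   This uses a single or merged build's shareduid_violation_modules.json
--   output file, as generated by find_shareduid_violation.py or
--   core/tasks/find-shareduid-violation.mk.
--
--   An error is defined as a sharedUserId that is found in a set of partitions
--   that span more than one partition group.
--
--   Args:
--     uid_dict: A dictionary created by using the standard json module to read a
--       complete shareduid_violation_modules.json file.
--     partition_groups: A list of groups, where each group is a list of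
--       partitions.
--
--   Returns:
--     A list of error messages.
--   """
--   errors = []
--   for uid, partitions in uid_dict.items():
--     found_in_groups = [
--         group for group in partition_groups
--         if set(partitions.keys()) & set(group)
--     ]
--     if len(found_in_groups) > 1:
--       errors.append(
--           "APK sharedUserId \"%s\" found across partition groups in partitions \"%s\""
--           % (uid, ",".join(sorted(partitions.keys()))))
--   return errors
-- ===== SOURCE B (Python) =====
-- def SharedUidPartitionViolations(uid_dict, partition_groups):
--   # Precompute partition -> set of group indices, then one pass per uid.
--   part_to_groups = {}
--   for gi, group in enumerate(partition_groups):
--     for p in group: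
--       s = part_to_groups.get(p, set())
--       s.add(gi)
--       part_to_groups[p] = s
--   errors = []
--   for uid, partitions in uid_dict.items():
--     gids = set()
--     for p in partitions:
--       gids |= part_to_groups.get(p, set())
--     if len(gids) > 1:
--       errors.append(
--           "APK sharedUserId \"%s\" found across partition groups in partitions \"%s\""
--           % (uid, ",".join(sorted(partitions.keys()))))
--   return errors
-- ===== Notes on version B (the rewrite author's own statement) =====
-- stated objective: faster
-- what changed: Instead of intersecting each uid's partition set with every group (U*G*P set builds), B builds one partition-to-group-indices dict and per uid unions the distinct group indices of its partitions in a single pass.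
import Mathlib
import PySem

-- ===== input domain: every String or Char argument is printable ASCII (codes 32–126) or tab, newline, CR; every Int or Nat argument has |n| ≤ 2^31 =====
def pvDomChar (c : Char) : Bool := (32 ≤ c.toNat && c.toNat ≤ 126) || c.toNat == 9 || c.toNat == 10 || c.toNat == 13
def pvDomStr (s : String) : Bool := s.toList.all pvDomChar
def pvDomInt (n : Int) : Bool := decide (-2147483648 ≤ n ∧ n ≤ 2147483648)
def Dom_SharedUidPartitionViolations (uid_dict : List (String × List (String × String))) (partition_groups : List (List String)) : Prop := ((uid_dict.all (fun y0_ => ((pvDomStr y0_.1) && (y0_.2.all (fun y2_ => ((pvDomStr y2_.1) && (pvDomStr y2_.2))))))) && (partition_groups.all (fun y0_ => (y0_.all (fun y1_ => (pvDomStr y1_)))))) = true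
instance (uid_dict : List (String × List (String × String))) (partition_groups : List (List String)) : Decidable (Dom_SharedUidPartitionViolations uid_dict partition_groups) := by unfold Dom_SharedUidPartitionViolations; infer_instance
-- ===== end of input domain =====

-- B replaces A's per-uid scan over all groups (building two sets per (uid, group) pair) by a
-- precomputed partition→group-indices dict and a single union pass per uid; return value only.

-- the error message both programs build
def pvMsg (uid : String) (partitions : List (String × String)) : String :=
  "APK sharedUserId \"" ++ uid ++ "\" found across partition groups in partitions \"" ++
    PySem.Str.join "," (PySem.List.sorted (partitions.map Prod.fst) (fun x => x) false) ++ "\""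

-- ===== PORT A =====
def SharedUidPartitionViolations (uid_dict : List (String × List (String × String))) (partition_groups : List (List String)) : List String :=
  uid_dict.foldl (fun errors pr =>
    let uid := pr.1
    let partitions := pr.2
    let found_in_groups := partition_groups.filter (fun group =>
      !(PySem.Set.inter (PySem.Set.ofList (partitions.map Prod.fst)) (PySem.Set.ofList group)).isEmpty)
    if found_in_groups.length > 1 then errors ++ [pvMsg uid partitions] else errors) []

-- ===== PORT B =====
-- inner loop 'for p in group: part_to_groups[p] = part_to_groups.get(p, set()) | {gi}' (as d.modify)
def pvAddGroup (d : PySem.Dict String (PySem.Set Int)) (pr : Int × List String) : PySem.Dict String (PySem.Set Int) :=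
  pr.2.foldl (fun d p => d.modify p PySem.Set.empty (fun s => PySem.Set.add s pr.1)) d

def pvBuildPTG (partition_groups : List (List String)) : PySem.Dict String (PySem.Set Int) :=
  (PySem.List.enumerate partition_groups).foldl pvAddGroup PySem.Dict.empty

def SharedUidPartitionViolations_alt (uid_dict : List (String × List (String × String))) (partition_groups : List (List String)) : List String :=
  let part_to_groups := pvBuildPTG partition_groups
  uid_dict.foldl (fun errors pr =>
    let uid := pr.1
    let partitions := pr.2
    let gids := partitions.foldl (fun s p => PySem.Set.union s (part_to_groups.getD p.1 PySem.Set.empty)) PySem.Set.empty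
    if gids.length > 1 then errors ++ [pvMsg uid partitions] else errors) []

-- ===== PRECONDITION & SPEC =====
def Spec_SharedUidPartitionViolations (uid_dict : List (String × List (String × String))) (partition_groups : List (List String)) (out : List String) : Prop := out = SharedUidPartitionViolations_alt uid_dict partition_groups
instance (uid_dict : List (String × List (String × String))) (partition_groups : List (List String)) (out : List String) : Decidable (Spec_SharedUidPartitionViolations uid_dict partition_groups out) := by unfold Spec_SharedUidPartitionViolations; infer_instance

-- ===== CLAIM (what is proved, stated in full; the proofs are below) =====
def Claim_equal_SharedUidPartitionViolations : Prop := ∀ (uid_dict : List (String × List (String × String))) (partition_groups : List (List String)), Dom_SharedUidPartitionViolations uid_dict partition_groups → Spec_SharedUidPartitionViolations uid_dict partition_groups (SharedUidPartitionViolations uid_dict partition_groups)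

-- ===== LEMMAS AND PROOFS =====

-- membership in the per-partition set after processing one group
theorem mem_getD_pvAddGroup (d : PySem.Dict String (PySem.Set Int)) (pr : Int × List String)
    (p : String) (x : Int) :
    x ∈ (pvAddGroup d pr).getD p PySem.Set.empty ↔
      x ∈ d.getD p PySem.Set.empty ∨ (p ∈ pr.2 ∧ x = pr.1) := by
  obtain ⟨gi, g⟩ := pr
  unfold pvAddGroup
  induction g generalizing d with
  | nil => simp
  | cons q g ih =>
    simp only [List.foldl_cons, ih, PySem.Dict.getD_modify]
    by_cases hq : p = q
    · simp [hq, PySem.Set.mem_add]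
      tauto
    · simp [if_neg hq]
      tauto

theorem mem_getD_foldl_pvAddGroup (l : List (Int × List String))
    (d : PySem.Dict String (PySem.Set Int)) (p : String) (x : Int) :
    x ∈ (l.foldl pvAddGroup d).getD p PySem.Set.empty ↔
      x ∈ d.getD p PySem.Set.empty ∨ ∃ pr ∈ l, p ∈ pr.2 ∧ x = pr.1 := by
  induction l generalizing d with
  | nil => simp
  | cons pr l ih =>
    simp only [List.foldl_cons, ih, mem_getD_pvAddGroup, List.mem_cons]
    constructor
    · rintro ((h | h) | ⟨q, hq, h⟩)
      · exact Or.inl h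
      · exact Or.inr ⟨pr, Or.inl rfl, h⟩
      · exact Or.inr ⟨q, Or.inr hq, h⟩
    · rintro (h | ⟨q, (rfl | hq), h⟩)
      · exact Or.inl (Or.inl h)
      · exact Or.inl (Or.inr h)
      · exact Or.inr ⟨q, hq, h⟩

theorem mem_getD_pvBuildPTG (pgs : List (List String)) (p : String) (x : Int) :
    x ∈ (pvBuildPTG pgs).getD p PySem.Set.empty ↔
      ∃ (k : Nat) (hk : k < pgs.length), p ∈ pgs[k] ∧ x = (k : Int) := by
  unfold pvBuildPTG
  rw [mem_getD_foldl_pvAddGroup]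
  simp only [PySem.Dict.getD_empty, PySem.Set.empty, List.not_mem_nil, false_or]
  constructor
  · rintro ⟨pr, hpr, hmem, hx⟩
    rw [PySem.List.mem_enumerate_iff] at hpr
    obtain ⟨k, hk, rfl⟩ := hpr
    exact ⟨k, hk, hmem, by simpa using hx⟩
  · rintro ⟨k, hk, hmem, rfl⟩
    refine ⟨(0 + (k : Int), pgs[k]), ?_, hmem, by simp⟩
    rw [PySem.List.mem_enumerate_iff]
    exact ⟨k, hk, rfl⟩

-- the union accumulation over a uid's partitions
theorem mem_foldl_union (ptg : PySem.Dict String (PySem.Set Int))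
    (partitions : List (String × String)) (s : PySem.Set Int) (x : Int) :
    x ∈ partitions.foldl (fun s p => PySem.Set.union s (ptg.getD p.1 PySem.Set.empty)) s ↔
      x ∈ s ∨ ∃ pr ∈ partitions, x ∈ ptg.getD pr.1 PySem.Set.empty := by
  induction partitions generalizing s with
  | nil => simp
  | cons q l ih =>
    simp only [List.foldl_cons, ih, PySem.Set.mem_union, List.mem_cons]
    constructor
    · rintro ((h | h) | ⟨r, hr, h⟩)
      · exact Or.inl h
      · exact Or.inr ⟨q, Or.inl rfl, h⟩
      · exact Or.inr ⟨r, Or.inr hr, h⟩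
    · rintro (h | ⟨r, (rfl | hr), h⟩)
      · exact Or.inl (Or.inl h)
      · exact Or.inl (Or.inr h)
      · exact Or.inr ⟨r, hr, h⟩

theorem nodup_foldl_union (ptg : PySem.Dict String (PySem.Set Int))
    (partitions : List (String × String)) (s : PySem.Set Int) (hs : s.Nodup) :
    (partitions.foldl (fun s p => PySem.Set.union s (ptg.getD p.1 PySem.Set.empty)) s).Nodup := by
  induction partitions generalizing s with
  | nil => exact hs
  | cons q l ih => exact ih _ (PySem.Set.nodup_union _ _ hs)

-- A's filter condition, restated as an existential
theorem filterCond_iff (partitions : List (String × String)) (g : List String) :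
    ((!(PySem.Set.inter (PySem.Set.ofList (partitions.map Prod.fst)) (PySem.Set.ofList g)).isEmpty) = true) ↔
      ∃ pr ∈ partitions, pr.1 ∈ g := by
  rw [Bool.not_eq_eq_eq_not, Bool.not_true, List.isEmpty_eq_false_iff_exists_mem]
  constructor
  · rintro ⟨x, hx⟩
    rw [PySem.Set.mem_inter] at hx
    obtain ⟨h1, h2⟩ := hx
    rw [PySem.Set.mem_ofList, List.mem_map] at h1
    obtain ⟨pr, hpr, rfl⟩ := h1
    rw [PySem.Set.mem_ofList] at h2
    exact ⟨pr, hpr, h2⟩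
  · rintro ⟨pr, hpr, hg⟩
    refine ⟨pr.1, ?_⟩
    rw [PySem.Set.mem_inter, PySem.Set.mem_ofList, PySem.Set.mem_ofList]
    exact ⟨List.mem_map.mpr ⟨pr, hpr, rfl⟩, hg⟩

-- per-uid: A's count of matching groups = size of B's set of group indices
theorem counts_eq (pgs : List (List String)) (partitions : List (String × String)) :
    (pgs.filter (fun group =>
      !(PySem.Set.inter (PySem.Set.ofList (partitions.map Prod.fst)) (PySem.Set.ofList group)).isEmpty)).length =
    (partitions.foldl (fun s p => PySem.Set.union s ((pvBuildPTG pgs).getD p.1 PySem.Set.empty)) PySem.Set.empty).length := by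
  set Q : List String → Bool := fun group =>
    !(PySem.Set.inter (PySem.Set.ofList (partitions.map Prod.fst)) (PySem.Set.ofList group)).isEmpty with hQ
  set gids := partitions.foldl (fun s p => PySem.Set.union s ((pvBuildPTG pgs).getD p.1 PySem.Set.empty)) PySem.Set.empty with hgids
  set E := (PySem.List.enumerate pgs).filter (fun pr => Q pr.2) with hE
  have hlenA : (pgs.filter Q).length = E.length := by
    conv_lhs => rw [← PySem.List.map_snd_enumerate pgs 0]
    rw [List.filter_map, List.length_map]
    rfl
  have hpairE : E.Pairwise (fun p q => p.1 < q.1) :=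
    List.Pairwise.filter _ (PySem.List.pairwise_lt_enumerate pgs 0)
  have hnodupE : (E.map Prod.fst).Nodup := by
    have : (E.map Prod.fst).Pairwise (fun a b : Int => a < b) :=
      List.pairwise_map.mpr hpairE
    exact this.imp (fun h => ne_of_lt h)
  have hnodupG : gids.Nodup := nodup_foldl_union _ _ _ List.nodup_nil
  have hmemE : ∀ x : Int, x ∈ E.map Prod.fst ↔ x ∈ gids := by
    intro x
    rw [hgids, mem_foldl_union]
    have hempty : ∀ y : Int, y ∈ (PySem.Set.empty : PySem.Set Int) ↔ False := by
      simp [PySem.Set.empty]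
    simp only [hempty, false_or, List.mem_map, hE, List.mem_filter]
    constructor
    · rintro ⟨pr, ⟨hpr, hq⟩, rfl⟩
      rw [PySem.List.mem_enumerate_iff] at hpr
      obtain ⟨k, hk, rfl⟩ := hpr
      rw [hQ, filterCond_iff] at hq
      obtain ⟨q, hq1, hq2⟩ := hq
      refine ⟨q, hq1, ?_⟩
      rw [mem_getD_pvBuildPTG]
      exact ⟨k, hk, hq2, by simp⟩
    · rintro ⟨q, hq1, hq2⟩
      rw [mem_getD_pvBuildPTG] at hq2
      obtain ⟨k, hk, hmem, rfl⟩ := hq2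
      refine ⟨(0 + (k : Int), pgs[k]), ⟨?_, ?_⟩, by simp⟩
      · rw [PySem.List.mem_enumerate_iff]; exact ⟨k, hk, rfl⟩
      · rw [hQ, filterCond_iff]; exact ⟨q, hq1, hmem⟩
  have hperm : (E.map Prod.fst).Perm gids :=
    (List.perm_ext_iff_of_nodup hnodupE hnodupG).mpr hmemE
  calc (pgs.filter Q).length = E.length := hlenA
    _ = (E.map Prod.fst).length := by simp
    _ = gids.length := hperm.length_eq

-- ===== VERDICT (by name: the statement is the Claim_ definition above) =====
theorem SharedUidPartitionViolations_spec : Claim_equal_SharedUidPartitionViolations := by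
  intro uid_dict partition_groups _
  unfold Spec_SharedUidPartitionViolations SharedUidPartitionViolations SharedUidPartitionViolations_alt
  have hfun : (fun (errors : List String) (pr : String × List (String × String)) =>
      let uid := pr.1
      let partitions := pr.2
      let found_in_groups := partition_groups.filter (fun group =>
        !(PySem.Set.inter (PySem.Set.ofList (partitions.map Prod.fst)) (PySem.Set.ofList group)).isEmpty)
      if found_in_groups.length > 1 then errors ++ [pvMsg uid partitions] else errors) =
      (fun (errors : List String) (pr : String × List (String × String)) =>
      let uid := pr.1
      let partitions := pr.2
      let gids := partitions.foldl (fun s p => PySem.Set.union s ((pvBuildPTG partition_groups).getD p.1 PySem.Set.empty)) PySem.Set.empty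
      if gids.length > 1 then errors ++ [pvMsg uid partitions] else errors) := by
    funext errors pr
    simp only [counts_eq partition_groups pr.2]
  rw [hfun]
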